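-- pv_equiv track=rewrite | github.com/LastCow9000/Algorithms | Algorithm/Programmers/2개 이하로 다른 비트/solution.py | solution
-- ===== SOURCE A (Python) =====
-- def solution(numbers):
--     answer = []
--     for num in numbers:
--         if num % 2 == 0:
--             answer.append(num + 1)
--         else:
--             num = format(num, 'b')
--             if '0' in num:
--                 num = num[::-1]
--                 idx = num.index('0')
--                 num = num[:idx - 1] + '01' + num[idx + 1:]
--                 num = num[::-1]
--                 answer.append(int(num, 2))
--                 '''
--                 10011 -> 1 10 01 뒤집기 전
--                 10101 -> 1 01 01 뒤집은 후
--                 '''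
--             else:
--                 num = int('10' + str(num)[1:], 2)
--                 answer.append(num)
--     return answer
-- ===== SOURCE B (Python) =====
-- def _next_num(num):
--     bit = ~num & (num + 1)   # lowest cleared bit of num
--     return num + bit - (bit >> 1)
--
-- def solution(numbers):
--     return [_next_num(num) for num in numbers]
-- ===== Notes on version B (the rewrite author's own statement) =====
-- stated objective: simpler
-- what changed: B drops A's binary-string formatting, reversal, index('0'), splicing and re-parsing entirely and computes the lowest cleared bit arithmetically (bit = ~num & (num+1)), appending num + bit - (bit >> 1), which covers A's three branches uniformly.
-- outside the precondition, e.g. on solution([-5]): A returns [-6], B returns [-3]; on solution([-1]): A returns [5], B returns [-1]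
import Mathlib
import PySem

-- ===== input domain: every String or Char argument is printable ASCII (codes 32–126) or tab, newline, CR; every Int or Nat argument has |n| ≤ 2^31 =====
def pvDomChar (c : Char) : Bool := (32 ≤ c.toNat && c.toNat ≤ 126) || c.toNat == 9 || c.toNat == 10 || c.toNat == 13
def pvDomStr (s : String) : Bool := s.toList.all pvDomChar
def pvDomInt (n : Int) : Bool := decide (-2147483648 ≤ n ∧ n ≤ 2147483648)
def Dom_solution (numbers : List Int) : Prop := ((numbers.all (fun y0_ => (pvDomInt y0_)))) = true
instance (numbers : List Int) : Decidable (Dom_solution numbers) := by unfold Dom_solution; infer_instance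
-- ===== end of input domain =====

-- B replaces A's binary-string formatting/reversal/index/splicing/re-parsing by the
-- constant-size bit formula bit = ~num & (num+1); answer = num + bit - (bit >> 1)  (objective: simpler).

-- ===== PORT A =====
-- format(num, 'b') is PySem.Int.toBinChars.  int(s, 2) is ported by hand below:
-- an optional leading '-' then binary digits, most significant first — exact precisely for
-- such strings (the only strings this program ever builds: no whitespace, '_' or '0b' prefix).
def pvValMSB (cs : List Char) : Nat :=
  cs.foldl (fun a c => 2 * a + (if c = '1' then 1 else 0)) 0

def pvParseBin (cs : List Char) : Int :=
  if cs.head? = some '-' then -(pvValMSB cs.tail : Int) else (pvValMSB cs : Int)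

def solution (numbers : List Int) : List Int :=
  numbers.foldl (fun answer num =>
    if PySem.Int.mod num 2 = 0 then
      answer ++ [num + 1]
    else
      -- num = format(num, 'b')
      let s : List Char := PySem.Int.toBinChars num
      if '0' ∈ s then                                       -- '0' in num
        let r := s.reverse                                  -- num = num[::-1]
        let idx : Nat := (PySem.List.index? r '0').getD 0   -- num.index('0'); guarded: '0' ∈ r
        -- num = num[:idx - 1] + '01' + num[idx + 1:]
        let r2 := PySem.List.slice r none (some ((idx : Int) - 1)) ++ ['0', '1'] ++
                    PySem.List.slice r (some ((idx : Int) + 1)) none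
        answer ++ [pvParseBin r2.reverse]                   -- int(num[::-1], 2)
      else
        -- int('10' + str(num)[1:], 2)
        answer ++ [pvParseBin ('1' :: '0' :: PySem.List.slice s (some 1) none)]
  ) []

-- ===== PORT B =====
def pvNextNum (num : Int) : Int :=
  let bit := PySem.Int.band (Int.not num) (num + 1)   -- ~num & (num + 1): lowest cleared bit
  num + bit - (bit >>> (1 : Nat))

def solution_alt (numbers : List Int) : List Int :=
  numbers.map pvNextNum

-- ===== PRECONDITION & SPEC =====
-- Pre_ excludes lists containing a negative ODD number: the puzzle's inputs are nonnegative,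
-- and on a negative odd number A formats |num| and splices binary digits around the '-' sign
-- character, producing accidental values B does not reproduce (on every even number, of
-- either sign, and on every nonnegative number A and B are proved to agree).
def Pre_solution (numbers : List Int) : Prop := ∀ n ∈ numbers, 0 ≤ n ∨ n % 2 = 0
instance (numbers : List Int) : Decidable (Pre_solution numbers) := by
  unfold Pre_solution; infer_instance

def pvWitness_solution : List Int := [0, 1, 2, 7, 11, 2147483647]

def Spec_solution (numbers : List Int) (out : List Int) : Prop := out = solution_alt numbers
instance (numbers : List Int) (out : List Int) : Decidable (Spec_solution numbers out) := by
  unfold Spec_solution; infer_instance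

-- ===== CLAIM (what is proved, stated in full; the proofs are below) =====
def Claim_equal_solution : Prop :=
  ∀ (numbers : List Int), Dom_solution numbers → Pre_solution numbers →
    Spec_solution numbers (solution numbers)

-- ===== LEMMAS AND PROOFS =====

-- binary digits of m, least significant first ([] for 0)
def pvBits (m : Nat) : List Char :=
  if h : m = 0 then [] else (if m % 2 = 1 then '1' else '0') :: pvBits (m / 2)
decreasing_by omega

-- number of trailing one bits of m
def pvT (m : Nat) : Nat :=
  if h : m % 2 = 1 then pvT (m / 2) + 1 else 0
decreasing_by omega

-- value of a least-significant-first digit list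
def pvVal : List Char → Nat
  | [] => 0
  | c :: cs => (if c = '1' then 1 else 0) + 2 * pvVal cs

-- A's per-element result, extracted from the fold body
def pvStep (num : Int) : Int :=
  if PySem.Int.mod num 2 = 0 then
    num + 1
  else
    let s : List Char := PySem.Int.toBinChars num
    if '0' ∈ s then
      let r := s.reverse
      let idx : Nat := (PySem.List.index? r '0').getD 0
      let r2 := PySem.List.slice r none (some ((idx : Int) - 1)) ++ ['0', '1'] ++
                  PySem.List.slice r (some ((idx : Int) + 1)) none
      pvParseBin r2.reverse
    else
      pvParseBin ('1' :: '0' :: PySem.List.slice s (some 1) none)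

theorem pvVal_append_singleton (l : List Char) (c : Char) :
    pvVal (l ++ [c]) = pvVal l + (if c = '1' then 1 else 0) * 2 ^ l.length := by
  induction l with
  | nil => simp [pvVal]
  | cons d l ih =>
      simp only [List.cons_append, pvVal, ih, List.length_cons, pow_succ]
      ring

theorem pvValMSB_foldl (cs : List Char) (a : Nat) :
    cs.foldl (fun a c => 2 * a + (if c = '1' then 1 else 0)) a
      = a * 2 ^ cs.length + pvVal cs.reverse := by
  induction cs generalizing a with
  | nil => simp [pvVal]
  | cons c cs ih =>
      simp only [List.foldl_cons, List.reverse_cons, ih, pvVal_append_singleton,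
        List.length_reverse, List.length_cons, pow_succ]
      ring

theorem pvValMSB_eq (cs : List Char) : pvValMSB cs = pvVal cs.reverse := by
  unfold pvValMSB
  simpa using pvValMSB_foldl cs 0

theorem pvBits_cons {m : Nat} (h : m ≠ 0) :
    pvBits m = (if m % 2 = 1 then '1' else '0') :: pvBits (m / 2) := by
  rw [pvBits]; simp [h]

theorem pvVal_pvBits (m : Nat) : pvVal (pvBits m) = m := by
  fun_induction pvBits m with
  | case1 => simp [pvVal]
  | case2 m h ih => by_cases h2 : m % 2 = 1 <;> simp [pvVal, h2, ih] <;> omega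

theorem pvBits_mem (m : Nat) (c : Char) (h : c ∈ pvBits m) : c = '0' ∨ c = '1' := by
  fun_induction pvBits m with
  | case1 => simp at h
  | case2 m hm ih =>
      rcases List.mem_cons.mp h with h1 | h1
      · by_cases h2 : m % 2 = 1 <;> simp [h2] at h1 <;> simp [h1]
      · exact ih h1

theorem pvDigitChar (m : Nat) : (m % 2).digitChar = if m % 2 = 1 then '1' else '0' := by
  rcases Nat.mod_two_eq_zero_or_one m with h | h <;> simp [h, Nat.digitChar]

theorem pvToDigitsCore_eq (fuel : Nat) :
    ∀ (m : Nat) (ds : List Char), m ≠ 0 → m ≤ fuel →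
      Nat.toDigitsCore 2 fuel m ds = (pvBits m).reverse ++ ds := by
  induction fuel with
  | zero => intro m ds h1 h2; omega
  | succ fuel ih =>
    intro m ds h1 h2
    rw [Nat.toDigitsCore]
    by_cases hz : m / 2 = 0
    · have hm1 : m = 1 := by omega
      subst hm1
      simp [pvBits_cons, pvBits]
      decide
    · simp only [hz, if_false]
      rw [ih (m / 2) _ hz (by omega)]
      rw [pvBits_cons h1, pvDigitChar, List.reverse_cons, List.append_assoc]
      simp

theorem pvToBinChars_natCast (m : Nat) (hm : m ≠ 0) :
    PySem.Int.toBinChars (m : Int) = (pvBits m).reverse := by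
  unfold PySem.Int.toBinChars
  rw [if_neg (by omega), Nat.toDigits]
  have h1 : ((m : Int)).toNat = m := rfl
  rw [h1, pvToDigitsCore_eq (m + 1) m [] hm (by omega)]
  simp

theorem pvT_even {m : Nat} (h : m % 2 ≠ 1) : pvT m = 0 := by
  rw [pvT]; simp [h]

theorem pvT_odd {m : Nat} (h : m % 2 = 1) : pvT m = pvT (m / 2) + 1 := by
  rw [pvT]; simp [h]

theorem pvPow_pvT_le (m : Nat) : 2 ^ pvT m ≤ m + 1 := by
  fun_induction pvT m with
  | case1 m h ih => rw [pow_succ]; omega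
  | case2 m h => simp

theorem pvDecomp (m : Nat) (h : m % 2 = 1) :
    pvBits m = List.replicate (pvT m) '1' ++ pvBits (m / 2 ^ pvT m) ∧
      (m / 2 ^ pvT m) % 2 = 0 := by
  induction m using Nat.strong_induction_on with
  | _ m ih =>
    have hm0 : m ≠ 0 := by omega
    have hd : ∀ t : Nat, m / 2 ^ (t + 1) = (m / 2) / 2 ^ t := fun t => by
      rw [pow_succ, Nat.mul_comm, ← Nat.div_div_eq_div_mul]
    by_cases hb : (m / 2) % 2 = 1
    · obtain ⟨ihb1, ihb2⟩ := ih (m / 2) (by omega) hb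
      constructor
      · rw [pvBits_cons hm0, if_pos h, pvT_odd h, List.replicate_succ, hd, List.cons_append,
          ← ihb1]
      · rw [pvT_odd h, hd]; exact ihb2
    · constructor
      · rw [pvBits_cons hm0, if_pos h, pvT_odd h, pvT_even hb, List.replicate_succ, hd]
        simp
      · rw [pvT_odd h, hd, pvT_even hb]
        simpa using hb

theorem pvVal_replicate_one_append (k : Nat) (l : List Char) :
    pvVal (List.replicate k '1' ++ l) = 2 ^ k - 1 + 2 ^ k * pvVal l := by
  induction k with
  | zero => simp
  | succ k ih =>
      simp only [List.replicate_succ, List.cons_append, pvVal, ih, pow_succ]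
      have h1 : 1 ≤ 2 ^ k := Nat.one_le_two_pow
      generalize hp2 : (2:Nat) ^ k = p at *
      generalize hv : pvVal l = v
      have h2 : p * 2 * v = 2 * (p * v) := by ring
      rw [h2]
      generalize p * v = q
      simp only [if_pos trivial]
      omega

theorem pvBit_true (a : Nat) : Nat.bit true a = 2 * a + 1 := by simp [Nat.bit]
theorem pvBit_false (a : Nat) : Nat.bit false a = 2 * a := by simp [Nat.bit]

theorem pvLandBit (x y : Bool) (a b : Nat) :
    (Nat.bit x a) &&& (Nat.bit y b) = Nat.bit (x && y) (a &&& b) := by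
  exact Nat.bitwise_bit (by simp) x a y b

theorem pvLand (m : Nat) : (m + 1) &&& m = m + 1 - 2 ^ pvT m := by
  induction m using Nat.strong_induction_on with
  | _ m ih =>
    by_cases h : m % 2 = 1
    · obtain ⟨b, rfl⟩ : ∃ b, m = 2 * b + 1 := ⟨m / 2, by omega⟩
      have hd : (2 * b + 1) / 2 = b := by omega
      have h1 : 2 * b + 1 + 1 = Nat.bit false (b + 1) := by rw [pvBit_false]; ring
      have h2 : 2 * b + 1 = Nat.bit true b := by rw [pvBit_true]
      rw [pvT_odd h, hd, h1, h2, pvLandBit, Bool.false_and, pvBit_false]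
      have ihb : (b + 1) &&& b = b + 1 - 2 ^ pvT b := ih b (by omega)
      have hle : 2 ^ pvT b ≤ b + 1 := pvPow_pvT_le b
      rw [ihb, pow_succ]
      omega
    · obtain ⟨b, rfl⟩ : ∃ b, m = 2 * b := ⟨m / 2, by omega⟩
      have h1 : 2 * b + 1 = Nat.bit true b := by rw [pvBit_true]
      have h2 : 2 * b = Nat.bit false b := by rw [pvBit_false]
      rw [pvT_even h, h1, h2, pvLandBit, Bool.true_and, pvBit_false, Nat.and_self]
      simp

theorem pvParseBin_of_not_neg {cs : List Char} (h : '-' ∉ cs) :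
    pvParseBin cs = (pvValMSB cs : Int) := by
  unfold pvParseBin
  rw [if_neg]
  intro hh
  exact h (by
    cases cs with
    | nil => simp at hh
    | cons c cs => simp at hh; simp [hh])

theorem pvNot_eq (n : Int) : Int.not n = -n - 1 := by
  cases n with
  | ofNat k =>
      rw [show Int.not (Int.ofNat k) = Int.negSucc k from rfl, Int.negSucc_eq,
        show Int.ofNat k = (k : Int) from rfl]
      ring
  | negSucc k =>
      rw [show Int.not (Int.negSucc k) = Int.ofNat k from rfl, Int.negSucc_eq,
        show Int.ofNat k = (k : Int) from rfl]
      ring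

theorem pvNextNum_neg_even (n : Int) (hneg : n < 0) (he : n % 2 = 0) :
    pvNextNum n = n + 1 := by
  obtain ⟨k, rfl⟩ : ∃ k : Nat, n = -(2 * (k : Int) + 2) := by
    refine ⟨(-n / 2 - 1).toNat, ?_⟩
    omega
  have hband : PySem.Int.band (Int.not (-(2 * (k : Int) + 2))) (-(2 * (k : Int) + 2) + 1) = 1 := by
    rw [pvNot_eq]
    unfold PySem.Int.band
    rw [if_pos (by omega), if_neg (by omega)]
    have e1 : (-(-(2 * (k : Int) + 2)) - 1).toNat = 2 * k + 1 := by omega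
    have e2 : (-(-(2 * (k : Int) + 2) + 1) - 1).toNat = 2 * k := by omega
    rw [e1, e2]
    have hb1 : 2 * k + 1 = Nat.bit true k := by rw [pvBit_true]
    have hb2 : 2 * k = Nat.bit false k := by rw [pvBit_false]
    rw [hb1, hb2, pvLandBit, Bool.true_and, pvBit_false, Nat.and_self, pvBit_true]
    have h9 : 2 * k + 1 - 2 * k = 1 := by omega
    rw [h9]
    rfl
  unfold pvNextNum
  simp only [hband]
  rw [show ((1 : Int) >>> (1 : Nat)) = 0 from by decide]
  ring

theorem pvNextNum_natCast (m : Nat) :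
    pvNextNum (m : Int) = (m : Int) + ((2 ^ pvT m : Nat) : Int) - ((2 ^ pvT m / 2 : Nat) : Int) := by
  have hnot : Int.not (m : Int) = -(m : Int) - 1 := by
    simp [Int.not]
    rw [Int.negSucc_eq]
    ring
  have hband : PySem.Int.band (Int.not (m : Int)) ((m : Int) + 1)
      = ((2 ^ pvT m : Nat) : Int) := by
    rw [hnot]
    unfold PySem.Int.band
    rw [if_neg (by omega), if_pos (by omega)]
    have e1 : (-(-(m : Int) - 1) - 1).toNat = m := by omega
    have e2 : ((m : Int) + 1).toNat = m + 1 := by omega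
    have h3 : m + 1 - (m + 1 - 2 ^ pvT m) = 2 ^ pvT m := by
      have h4 := pvPow_pvT_le m
      generalize 2 ^ pvT m = p at *
      omega
    rw [e1, e2, pvLand, h3]
  unfold pvNextNum
  simp only [hband, ← Int.natCast_shiftRight]
  norm_num [Nat.shiftRight_succ, Nat.shiftRight_zero]

theorem pvStep_natCast (m : Nat) :
    pvStep (m : Int) = (m : Int) + ((2 ^ pvT m : Nat) : Int) - ((2 ^ pvT m / 2 : Nat) : Int) := by
  have hmod : PySem.Int.mod (m : Int) 2 = ((m % 2 : Nat) : Int) := by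
    rw [PySem.Int.mod_eq_emod_of_pos (by norm_num)]
    exact_mod_cast rfl
  unfold pvStep
  by_cases hpar : m % 2 = 0
  · rw [hmod, if_pos (by exact_mod_cast hpar)]
    rw [pvT_even (by omega)]
    norm_num
  · have hodd : m % 2 = 1 := by omega
    have hm0 : m ≠ 0 := by omega
    rw [hmod, if_neg (by exact_mod_cast hpar)]
    obtain ⟨hb, hr2⟩ := pvDecomp m hodd
    have ht1 : 1 ≤ pvT m := by rw [pvT_odd hodd]; omega
    set t := pvT m with ht
    set r := m / 2 ^ t with hrdef
    have hbin : PySem.Int.toBinChars (m : Int) = (pvBits m).reverse := pvToBinChars_natCast m hm0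
    have hpow : 2 ^ t = 2 * 2 ^ (t - 1) := by
      cases ht' : t with
      | zero => omega
      | succ u => simp [pow_succ]; ring
    have hdiv : 2 ^ t / 2 = 2 ^ (t - 1) := by
      generalize 2 ^ (t - 1) = p at hpow ⊢
      omega
    have h1p : 1 ≤ 2 ^ (t - 1) := Nat.one_le_two_pow
    by_cases hr0 : r = 0
    · -- all ones: m = 2^t - 1
      have hbits : pvBits m = List.replicate t '1' := by
        rw [hb, hr0]
        simp [pvBits]
      have hm_val : m = 2 ^ t - 1 := by
        have h5 := pvVal_pvBits m
        rw [hbits, show List.replicate t '1' = List.replicate t '1' ++ [] by simp,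
          pvVal_replicate_one_append] at h5
        simp [pvVal] at h5
        omega
      have hnotin : ¬ ('0' ∈ (pvBits m).reverse) := by
        rw [hbits, List.reverse_replicate]
        simp [List.mem_replicate]
      simp only [hbin, if_neg hnotin]
      rw [hbits, List.reverse_replicate, PySem.List.slice_from_one]
      have htail : (List.replicate t '1').tail = List.replicate (t - 1) '1' := by
        cases ht' : t with
        | zero => omega
        | succ u => simp [List.replicate_succ]
      rw [htail]
      have hnm : '-' ∉ '1' :: '0' :: List.replicate (t - 1) '1' := by
        simp [List.mem_replicate]
      rw [pvParseBin_of_not_neg hnm, pvValMSB_eq]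
      have hrev : ('1' :: '0' :: List.replicate (t - 1) '1').reverse
          = List.replicate (t - 1) '1' ++ ['0', '1'] := by
        simp
      rw [hrev, pvVal_replicate_one_append]
      have hv01 : pvVal ['0', '1'] = 2 := by simp [pvVal]
      rw [hv01]
      generalize 2 ^ (t - 1) = p at *
      generalize 2 ^ t = P at *
      omega
    · -- there is a zero bit: r even, nonzero
      have hbr : pvBits r = '0' :: pvBits (r / 2) := by
        rw [pvBits_cons hr0]
        simp [show ¬ (r % 2 = 1) by omega]
      have hbitsm : pvBits m = List.replicate t '1' ++ '0' :: pvBits (r / 2) := by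
        rw [hb, hbr]
      have hin : '0' ∈ (pvBits m).reverse := by
        rw [hbitsm]
        simp
      simp only [hbin, if_pos hin]
      rw [List.reverse_reverse]
      have hidx : PySem.List.index? (pvBits m) '0' = some t := by
        rw [PySem.List.index?_eq_some_iff]
        exact ⟨List.replicate t '1', pvBits (r / 2), by rw [hbitsm], by simp,
          by simp [List.mem_replicate]⟩
      rw [hidx]
      simp only [Option.getD_some]
      have hc1 : ((t : Nat) : Int) - 1 = ((t - 1 : Nat) : Int) := by omega
      have hc2 : ((t : Nat) : Int) + 1 = ((t + 1 : Nat) : Int) := by omega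
      rw [hc1, PySem.List.slice_to_natCast, hc2, PySem.List.slice_from_natCast]
      have htake : (pvBits m).take (t - 1) = List.replicate (t - 1) '1' := by
        rw [hbitsm, List.take_append_of_le_length (by simp), List.take_replicate]
        congr 1
        omega
      have hdrop : (pvBits m).drop (t + 1) = pvBits (r / 2) := by
        have he : pvBits m = (List.replicate t '1' ++ ['0']) ++ pvBits (r / 2) := by
          rw [hbitsm]
          simp
        rw [he, show t + 1 = (List.replicate t '1' ++ ['0']).length by simp, List.drop_left]
      rw [htake, hdrop]
      have hnm : '-' ∉ List.replicate (t - 1) '1' ++ ['0', '1'] ++ pvBits (r / 2) := by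
        intro hmem
        rcases List.mem_append.mp hmem with h' | h'
        · rcases List.mem_append.mp h' with h'' | h''
          · simp [List.mem_replicate] at h''
          · simp at h''
        · rcases pvBits_mem (r / 2) '-' h' with h'' | h'' <;> simp at h''
      have hnm' : '-' ∉ (List.replicate (t - 1) '1' ++ ['0', '1'] ++ pvBits (r / 2)).reverse := by
        simpa using hnm
      rw [pvParseBin_of_not_neg hnm', pvValMSB_eq, List.reverse_reverse]
      have hassoc : List.replicate (t - 1) '1' ++ ['0', '1'] ++ pvBits (r / 2)
          = List.replicate (t - 1) '1' ++ ('0' :: '1' :: pvBits (r / 2)) := by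
        simp
      rw [hassoc, pvVal_replicate_one_append]
      have hvrest : pvVal (pvBits (r / 2)) = r / 2 := pvVal_pvBits (r / 2)
      have hval2 : pvVal ('0' :: '1' :: pvBits (r / 2)) = 2 + 4 * (r / 2) := by
        simp [pvVal, hvrest]
        ring
      rw [hval2]
      have hmval : m = 2 ^ t - 1 + 2 ^ t * (2 * (r / 2)) := by
        have h5 := pvVal_pvBits m
        rw [hbitsm, pvVal_replicate_one_append] at h5
        simp only [pvVal, hvrest, if_neg (show ¬ ('0' : Char) = '1' by decide),
          Nat.zero_add] at h5
        exact h5.symm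
      have hexp1 : 2 ^ (t - 1) * (2 + 4 * (r / 2))
          = 2 * 2 ^ (t - 1) + 4 * (2 ^ (t - 1) * (r / 2)) := by ring
      have hexp2 : 2 ^ t * (2 * (r / 2)) = 4 * (2 ^ (t - 1) * (r / 2)) := by
        rw [hpow]; ring
      rw [hexp1]
      rw [hexp2] at hmval
      generalize 2 ^ (t - 1) * (r / 2) = q at *
      generalize 2 ^ (t - 1) = p at *
      generalize 2 ^ t = P at *
      omega

theorem pvSolution_eq_map (numbers : List Int) :
    solution numbers = numbers.map pvStep := by
  unfold solution
  rw [List.foldl_ext _ (fun acc num => acc ++ [pvStep num]) [] (by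
    intro acc n _
    unfold pvStep
    beta_reduce
    by_cases h1 : PySem.Int.mod n 2 = 0
    · simp only [if_pos h1]
    · simp only [if_neg h1]
      by_cases h2 : '0' ∈ PySem.Int.toBinChars n
      · simp only [if_pos h2]
      · simp only [if_neg h2])]
  simpa using PySem.List.foldl_append_singleton_eq_map pvStep numbers []

-- ===== VERDICT (by name: the statement is the Claim_ definition above) =====
theorem solution_spec : Claim_equal_solution := by
  intro numbers _ hpre
  unfold Spec_solution solution_alt
  rw [pvSolution_eq_map]
  apply List.map_congr_left
  intro n hn
  by_cases h0 : 0 ≤ n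
  · have hn' : n = ((n.toNat : Nat) : Int) := (Int.toNat_of_nonneg h0).symm
    rw [hn', pvStep_natCast, pvNextNum_natCast]
  · have he : n % 2 = 0 := (hpre n hn).resolve_left h0
    have hmod : PySem.Int.mod n 2 = 0 := by
      rw [PySem.Int.mod_eq_emod_of_pos (by norm_num)]
      exact he
    rw [pvNextNum_neg_even n (by omega) he]
    unfold pvStep
    rw [if_pos hmod]
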